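-- pv_equiv track=rewrite | github.com/ThorstenSuckow/adventofcode24 | day2/part1.py | process
-- ===== SOURCE A (Python) =====
-- def process(input: list) -> int:
--
--     safe_rows = 0
--
--     for i in range(0, len(input)):
--         row = input[i]
--         safe = True
--         listlen = len(row)
--         res = 0
--         prev = -1
--         for j in range(0, listlen):
--             if j+1 < listlen:
--
--                 # order changed
--                 if ((row[j] - row[j+1] < 0 and res > 0) or
--                    (row[j] - row[j+1] > 0 and res < 0)):
--                     safe = False
--                     break
--
--                 res = row[j] - row[j+1]
--
--                 # neither an increase or a decrease
--                 # Any two adjacent levels differ by at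
--                 #  least one and at most three.
--                 if  res == 0 or abs(res) > 3:
--                     safe = False
--                     break
--
--         if safe is True:
--             safe_rows += 1
--
--     return safe_rows
-- ===== SOURCE B (Python) =====
-- def process(input: list) -> int:
--     def safe(row):
--         monotone = row == sorted(row) or row == sorted(row, reverse=True)
--         gaps = all(1 <= abs(a - b) <= 3 for a, b in zip(row, row[1:]))
--         return monotone and gaps
--     return sum(1 for row in input if safe(row))
-- ===== Notes on version B (the rewrite author's own statement) =====
-- stated objective: simpler
-- what changed: Replaces A's index loop with incremental previous-difference sign tracking and break by a declarative per-row check: monotonicity decided by comparison against sorted(row) (both directions) plus a separate all() over adjacent absolute gaps, counted with sum().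
import Mathlib
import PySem

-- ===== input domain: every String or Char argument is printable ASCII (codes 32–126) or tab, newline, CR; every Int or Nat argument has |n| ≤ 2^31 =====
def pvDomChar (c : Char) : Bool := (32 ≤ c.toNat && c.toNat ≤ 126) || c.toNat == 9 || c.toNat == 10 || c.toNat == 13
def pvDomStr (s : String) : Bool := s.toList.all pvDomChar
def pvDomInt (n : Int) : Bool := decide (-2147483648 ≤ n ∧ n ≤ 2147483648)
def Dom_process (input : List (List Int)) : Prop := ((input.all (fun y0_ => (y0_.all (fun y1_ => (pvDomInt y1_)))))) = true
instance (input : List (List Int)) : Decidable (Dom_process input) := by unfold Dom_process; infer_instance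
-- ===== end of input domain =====

-- B: declarative per-row safety — monotonicity via comparison with sorted(row) plus a separate
-- adjacent-gap check — instead of A's incremental previous-difference sign tracking with break (objective: simpler).


-- ===== PORT A =====
-- A's inner loop: for j in range(listlen), acting only when j+1 < listlen on row[j], row[j+1],
-- carrying res (the previous difference) and breaking with safe=False; rendered as the structural
-- recursion on the remaining suffix (row[j] :: row[j+1] :: rest), same state res, same checks in order.
def aLoop : List Int → Int → Bool
  | a :: b :: rest, res =>
    -- order changed
    if (a - b < 0 ∧ res > 0) ∨ (a - b > 0 ∧ res < 0) then false
    else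
      let res' := a - b
      -- neither an increase or a decrease / gap larger than three
      if res' = 0 ∨ 3 < |res'| then false
      else aLoop (b :: rest) res'
  | _, _ => true

def process (input : List (List Int)) : Int :=
  input.foldl (fun safe_rows row => if aLoop row 0 then safe_rows + 1 else safe_rows) 0

-- ===== PORT B =====
def bSafe (row : List Int) : Bool :=
  ((decide (row = PySem.List.sorted row (fun x => x) false)) ||
   (decide (row = PySem.List.sorted row (fun x => x) true))) &&
  (row.zip row.tail).all (fun p => decide (1 ≤ |p.1 - p.2| ∧ |p.1 - p.2| ≤ 3))

def process_alt (input : List (List Int)) : Int :=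
  (input.map (fun row => if bSafe row then (1 : Int) else 0)).sum

-- ===== PRECONDITION & SPEC =====
def Spec_process (input : List (List Int)) (out : Int) : Prop := out = process_alt input
instance (input : List (List Int)) (out : Int) : Decidable (Spec_process input out) := by unfold Spec_process; infer_instance

-- ===== CLAIM (what is proved, stated in full; the proofs are below) =====
def Claim_equal_process : Prop := ∀ (input : List (List Int)), Dom_process input → Spec_process input (process input)

-- ===== LEMMAS AND PROOFS =====

-- the two strict chain conditions A's loop enforces
def decChain (row : List Int) : Prop := List.IsChain (fun a b => 1 ≤ a - b ∧ a - b ≤ 3) row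
def incChain (row : List Int) : Prop := List.IsChain (fun a b => 1 ≤ b - a ∧ b - a ≤ 3) row

lemma aLoop_pos : ∀ (row : List Int) (res : Int), 0 < res →
    (aLoop row res = true ↔ decChain row) := by
  intro row
  induction row with
  | nil => intro res _; simp [aLoop, decChain]
  | cons a t ih =>
    intro res hres
    cases t with
    | nil => simp [aLoop, decChain]
    | cons b rest =>
      by_cases h1 : (a - b < 0 ∧ res > 0) ∨ (a - b > 0 ∧ res < 0)
      · simp only [aLoop, if_pos h1]
        constructor
        · intro h; exact absurd h (by simp)
        · intro h
          unfold decChain at h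
          rw [List.isChain_cons_cons] at h
          omega
      · simp only [aLoop, if_neg h1]
        by_cases h2 : a - b = 0 ∨ 3 < |a - b|
        · simp only [if_pos h2]
          constructor
          · intro h; exact absurd h (by simp)
          · intro h
            unfold decChain at h
            rw [List.isChain_cons_cons] at h
            obtain ⟨⟨hd1, hd2⟩, -⟩ := h
            rcases h2 with h2 | h2
            · omega
            · rw [abs_of_pos (by omega)] at h2; omega
        · simp only [if_neg h2]
          push Not at h1 h2
          have hpos : 0 < a - b := by
            rcases lt_trichotomy (a - b) 0 with h | h | h
            · exact absurd hres (by have := h1.1 h; omega)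
            · exact absurd h h2.1
            · exact h
          rw [ih (a - b) hpos]
          unfold decChain
          rw [List.isChain_cons_cons]
          have : 1 ≤ a - b ∧ a - b ≤ 3 := by
            refine ⟨by omega, ?_⟩
            have := h2.2; rw [abs_of_pos hpos] at this; omega
          tauto

lemma aLoop_neg : ∀ (row : List Int) (res : Int), res < 0 →
    (aLoop row res = true ↔ incChain row) := by
  intro row
  induction row with
  | nil => intro res _; simp [aLoop, incChain]
  | cons a t ih =>
    intro res hres
    cases t with
    | nil => simp [aLoop, incChain]
    | cons b rest =>
      by_cases h1 : (a - b < 0 ∧ res > 0) ∨ (a - b > 0 ∧ res < 0)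
      · simp only [aLoop, if_pos h1]
        constructor
        · intro h; exact absurd h (by simp)
        · intro h
          unfold incChain at h
          rw [List.isChain_cons_cons] at h
          omega
      · simp only [aLoop, if_neg h1]
        by_cases h2 : a - b = 0 ∨ 3 < |a - b|
        · simp only [if_pos h2]
          constructor
          · intro h; exact absurd h (by simp)
          · intro h
            unfold incChain at h
            rw [List.isChain_cons_cons] at h
            obtain ⟨⟨hd1, hd2⟩, -⟩ := h
            rcases h2 with h2 | h2
            · omega
            · rw [abs_of_neg (by omega)] at h2; omega
        · simp only [if_neg h2]
          push Not at h1 h2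
          have hneg : a - b < 0 := by
            rcases lt_trichotomy (a - b) 0 with h | h | h
            · exact h
            · exact absurd h h2.1
            · exact absurd hres (by have := h1.2 h; omega)
          rw [ih (a - b) hneg]
          unfold incChain
          rw [List.isChain_cons_cons]
          have : 1 ≤ b - a ∧ b - a ≤ 3 := by
            refine ⟨by omega, ?_⟩
            have := h2.2; rw [abs_of_neg hneg] at this; omega
          tauto

-- A's loop started with res = 0 accepts exactly the two strict chains
lemma aLoop_zero_iff (row : List Int) :
    aLoop row 0 = true ↔ (decChain row ∨ incChain row) := by
  cases row with
  | nil => simp [aLoop, decChain, incChain]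
  | cons a t =>
    cases t with
    | nil => simp [aLoop, decChain, incChain]
    | cons b rest =>
      have h1 : ¬ ((a - b < 0 ∧ (0:Int) > 0) ∨ (a - b > 0 ∧ (0:Int) < 0)) := by omega
      simp only [aLoop, if_neg h1]
      by_cases h2 : a - b = 0 ∨ 3 < |a - b|
      · simp only [if_pos h2]
        constructor
        · intro h; exact absurd h (by simp)
        · intro h
          unfold decChain incChain at h
          rcases h with h | h <;> rw [List.isChain_cons_cons] at h <;>
            obtain ⟨⟨hd1, hd2⟩, -⟩ := h <;> rcases h2 with h2 | h2 <;>
            first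
              | omega
              | (rw [abs_of_pos (by omega)] at h2; omega)
              | (rw [abs_of_neg (by omega)] at h2; omega)
      · simp only [if_neg h2]
        push Not at h2
        rcases lt_trichotomy (a - b) 0 with h | h | h
        · rw [aLoop_neg _ _ h]
          unfold decChain incChain
          rw [List.isChain_cons_cons, List.isChain_cons_cons]
          have hb : 1 ≤ b - a ∧ b - a ≤ 3 := by
            refine ⟨by omega, ?_⟩
            have := h2.2; rw [abs_of_neg h] at this; omega
          constructor
          · intro hc; right; exact ⟨hb, hc⟩
          · intro hc
            rcases hc with ⟨⟨hx, -⟩, -⟩ | ⟨-, hc⟩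
            · omega
            · exact hc
        · exact absurd h h2.1
        · rw [aLoop_pos _ _ h]
          unfold decChain incChain
          rw [List.isChain_cons_cons, List.isChain_cons_cons]
          have hb : 1 ≤ a - b ∧ a - b ≤ 3 := by
            refine ⟨by omega, ?_⟩
            have := h2.2; rw [abs_of_pos h] at this; omega
          constructor
          · intro hc; left; exact ⟨hb, hc⟩
          · intro hc
            rcases hc with ⟨-, hc⟩ | ⟨⟨hx, -⟩, -⟩
            · exact hc
            · omega

-- the zip-all gap test is the gap chain
lemma zip_all_iff_isChain (p : Int → Int → Prop) [DecidablePred fun x : Int × Int => p x.1 x.2] :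
    ∀ row : List Int,
      ((row.zip row.tail).all (fun x => decide (p x.1 x.2)) = true ↔ List.IsChain p row) := by
  intro row
  induction row with
  | nil => simp
  | cons a t ih =>
    cases t with
    | nil => simp
    | cons b rest =>
      simp only [List.tail_cons, List.zip_cons_cons, List.all_cons, Bool.and_eq_true,
        decide_eq_true_eq, List.isChain_cons_cons]
      rw [← ih]
      simp [List.tail_cons]

-- two chains combined pointwise (specific gluing of B's two tests into A's one chain)
lemma isChain_combine {p q r : Int → Int → Prop} (h : ∀ a b, p a b → q a b → r a b) :
    ∀ l : List Int, List.IsChain p l → List.IsChain q l → List.IsChain r l := by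
  intro l
  induction l with
  | nil => intro _ _; simp
  | cons a t ih =>
    cases t with
    | nil => intro _ _; simp
    | cons b rest =>
      rw [List.isChain_cons_cons, List.isChain_cons_cons, List.isChain_cons_cons]
      rintro ⟨hp, hps⟩ ⟨hq, hqs⟩
      exact ⟨h a b hp hq, ih hps hqs⟩

-- row == sorted(row) is the nondecreasing chain, row == sorted(row, reverse=True) the nonincreasing one
lemma eq_sorted_iff (row : List Int) :
    row = PySem.List.sorted row (fun x => x) false ↔ List.IsChain (· ≤ ·) row := by
  rw [List.isChain_iff_pairwise]
  constructor
  · intro h; rw [h]; exact PySem.List.sorted_pairwise row (fun x => x)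
  · intro h; exact (PySem.List.sorted_eq_self_of_pairwise row (fun x => x) h).symm

lemma eq_sorted_rev_iff (row : List Int) :
    row = PySem.List.sorted row (fun x => x) true ↔ List.IsChain (fun a b : Int => b ≤ a) row := by
  rw [List.isChain_iff_pairwise]
  constructor
  · intro h; rw [h]; exact PySem.List.sorted_pairwise_rev row (fun x => x)
  · intro h; exact (PySem.List.sorted_rev_eq_self_of_pairwise row (fun x => x) h).symm

-- per-row agreement of the two safety tests
lemma row_eq (row : List Int) : aLoop row 0 = bSafe row := by
  rw [Bool.eq_iff_iff, aLoop_zero_iff]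
  unfold bSafe
  rw [Bool.and_eq_true, Bool.or_eq_true, decide_eq_true_eq, decide_eq_true_eq,
    eq_sorted_iff, eq_sorted_rev_iff,
    zip_all_iff_isChain (fun a b => 1 ≤ |a - b| ∧ |a - b| ≤ 3)]
  unfold decChain incChain
  constructor
  · rintro (h | h)
    · exact ⟨Or.inr (h.imp (by intro a b hab; omega)),
        h.imp (by intro a b hab; rw [abs_of_pos (by omega)]; omega)⟩
    · exact ⟨Or.inl (h.imp (by intro a b hab; omega)),
        h.imp (by intro a b hab; rw [abs_of_neg (by omega)]; omega)⟩
  · rintro ⟨hmono | hmono, hgap⟩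
    · right
      refine isChain_combine ?_ row hmono hgap
      intro a b h1 h2
      rw [abs_of_nonpos (by omega)] at h2; omega
    · left
      refine isChain_combine ?_ row hmono hgap
      intro a b h1 h2
      rw [abs_of_nonneg (by omega)] at h2; omega

lemma process_eq_count (input : List (List Int)) :
    ∀ acc : Int,
      input.foldl (fun safe_rows row => if aLoop row 0 then safe_rows + 1 else safe_rows) acc
        = acc + (input.map (fun row => if bSafe row then (1 : Int) else 0)).sum := by
  induction input with
  | nil => intro acc; simp
  | cons r t ih =>
    intro acc
    simp only [List.foldl_cons, List.map_cons, List.sum_cons, ih, row_eq r]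
    split <;> ring

-- ===== VERDICT (by name: the statement is the Claim_ definition above) =====
theorem process_spec : Claim_equal_process := by
  intro input _
  unfold Spec_process process process_alt
  simpa using process_eq_count input 0
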